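-- pv_equiv track=rewrite | github.com/rehnmark75/TradeSystemV1-Moved | worker/app/forex_scanner/core/trading/market_monitor.py | _is_session_overlap
-- ===== SOURCE A (Python) =====
-- def _is_session_overlap(hour: int) -> bool:
--     """Check if current hour has overlapping trading sessions"""
--     # Major overlaps:
--     # London-New York: 13:00-17:00 UTC
--     # Tokyo-London: 8:00-9:00 UTC
--     # Sydney-Tokyo: 0:00-6:00 UTC
--
--     overlaps = [
--         (13, 17),  # London-New York
--         (8, 9),    # Tokyo-London
--         (0, 6)     # Sydney-Tokyo
--     ]
--
--     for start, end in overlaps: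
--         if start <= hour < end:
--             return True
--     return False
-- ===== SOURCE B (Python) =====
-- OVERLAP_HOURS = frozenset({0, 1, 2, 3, 4, 5, 8, 13, 14, 15, 16})
--
-- def _is_session_overlap(hour: int) -> bool:
--     """Check if current hour has overlapping trading sessions"""
--     return hour in OVERLAP_HOURS
-- ===== Notes on version B (the rewrite author's own statement) =====
-- stated objective: idiomatic
-- what changed: Replaces the loop over (start, end) interval pairs with a single membership test in a precomputed set of overlap hours; the loop and the start<=hour<end comparison disappear.
import Mathlib
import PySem

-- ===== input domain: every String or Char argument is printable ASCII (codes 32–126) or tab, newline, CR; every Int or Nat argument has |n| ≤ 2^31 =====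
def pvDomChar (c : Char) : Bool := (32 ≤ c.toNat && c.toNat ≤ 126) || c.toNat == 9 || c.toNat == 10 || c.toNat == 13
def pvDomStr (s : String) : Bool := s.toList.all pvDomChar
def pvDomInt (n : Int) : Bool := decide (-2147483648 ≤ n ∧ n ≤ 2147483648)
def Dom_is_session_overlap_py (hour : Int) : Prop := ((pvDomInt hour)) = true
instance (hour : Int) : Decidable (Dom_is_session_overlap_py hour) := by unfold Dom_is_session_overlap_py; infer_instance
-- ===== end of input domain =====

-- B replaces A's loop over (start, end) intervals with one membership test in a precomputed set of overlap hours (idiomatic; same cost).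


-- ===== PORT A =====
-- A: scan the list of (start, end) overlap intervals, return True on first hit.
def pyOverlaps : List (Int × Int) := [(13, 17), (8, 9), (0, 6)]

def is_session_overlap_py_loop : List (Int × Int) → Int → Bool
  | [], _ => false
  | (s, e) :: rest, hour => if s ≤ hour ∧ hour < e then true else is_session_overlap_py_loop rest hour

def is_session_overlap_py (hour : Int) : Bool := is_session_overlap_py_loop pyOverlaps hour

-- ===== PORT B =====
-- B (idiomatic): membership in a precomputed set of overlap hours (frozenset in Python).
def overlapHours : PySem.Set Int := PySem.Set.ofList [0, 1, 2, 3, 4, 5, 8, 13, 14, 15, 16]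

def is_session_overlap_py_alt (hour : Int) : Bool := overlapHours.contains hour

-- ===== PRECONDITION & SPEC =====
def Spec_is_session_overlap_py (hour : Int) (out : Bool) : Prop := out = is_session_overlap_py_alt hour
instance (hour : Int) (out : Bool) : Decidable (Spec_is_session_overlap_py hour out) := by unfold Spec_is_session_overlap_py; infer_instance

-- ===== CLAIM (what is proved, stated in full; the proofs are below) =====
def Claim_equal_is_session_overlap_py : Prop := ∀ (hour : Int), Dom_is_session_overlap_py hour → Spec_is_session_overlap_py hour (is_session_overlap_py hour)

-- ===== LEMMAS AND PROOFS =====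

-- ===== VERDICT (by name: the statement is the Claim_ definition above) =====
theorem is_session_overlap_py_spec : Claim_equal_is_session_overlap_py := by
  intro hour _
  unfold Spec_is_session_overlap_py
  simp only [is_session_overlap_py, is_session_overlap_py_alt, pyOverlaps, overlapHours,
    is_session_overlap_py_loop, PySem.Set.ofList, PySem.Set.contains]
  simp only [PySem.Set.add, PySem.Set.contains, List.contains_eq_mem, List.mem_cons,
    List.not_mem_nil, decide_eq_true_eq]
  split_ifs <;> simp <;> omega
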